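-- pv_equiv track=rewrite | github.com/AMC-dyn/PyXSCAT | omp_big_loop/symmetry.py | findirrep
-- ===== SOURCE A (Python) =====
-- def findirrep(nirreps,slaterdet):
--
--     dpta = [[1, 2], [2, 1]]
--     dptb = [[1, 2, 3, 4], [2, 1, 4, 3], [3, 4, 1, 2], [4, 3, 2, 1]]
--     dptc = [[1, 2, 3, 4, 5, 6, 7, 8], [2, 1, 4, 3, 6, 5, 8, 7], [3, 4, 1, 2, 7, 8, 5, 6],
--             [4, 3, 2, 1, 8, 7, 6, 5], [5, 6, 7, 8, 1, 2, 3, 4], [6, 5, 8, 7, 2, 1, 4, 3],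
--             [7, 8, 5, 6, 3, 4, 1, 2], [8, 7, 6, 5, 4, 3, 2, 1]]
--
--     if nirreps == 2:
--         dpt = dpta
--     elif nirreps == 4:
--         dpt = dptb
--     elif nirreps == 8:
--         dpt = dptc
--
--     sirr = []
--
--     for irr in range(nirreps):
--         occstr = slaterdet[irr].replace('0','').replace('a','1').replace('b','1')
--         val = 0
--         for digit in occstr:
--             val = val + int(digit)
--         if irr > 0 and val % 2 != 0:
--             sirr.append(irr)
--
--     nsirr = len(sirr)
--
--     if nsirr == 0:
--         irrep = 1
--     elif nsirr == 1:
--         irrep = sirr[0] + 1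
--     else:
--         irrep = dpt[sirr[0]][sirr[1]]
--         if nsirr > 2:
--             for irr in range(2,nsirr):
--                 irrep = dpt[(irrep-1)][sirr[irr]]
--
--     return irrep
-- ===== SOURCE B (Python) =====
-- def findirrep(nirreps, slaterdet):
--     # Each product table is dpt[i][j] == (i ^ j) + 1, so chaining table lookups
--     # is just XOR-ing the indices of the odd-occupation irreps.
--     acc = 0
--     for irr in range(1, nirreps):
--         if sum(c in 'ab13579' for c in slaterdet[irr]) % 2:
--             acc ^= irr
--     return acc + 1
-- ===== Notes on version B (the rewrite author's own statement) =====
-- stated objective: simpler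
-- what changed: Every product table satisfies dpt[i][j] = (i XOR j) + 1, so B drops all three tables, the sirr list and the chaining loop and instead XORs the index of each odd-occupation irrep (counting 'a','b' and odd digits directly, without building replaced strings) into one accumulator in a single pass, returning accumulator+1.
import Mathlib
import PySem

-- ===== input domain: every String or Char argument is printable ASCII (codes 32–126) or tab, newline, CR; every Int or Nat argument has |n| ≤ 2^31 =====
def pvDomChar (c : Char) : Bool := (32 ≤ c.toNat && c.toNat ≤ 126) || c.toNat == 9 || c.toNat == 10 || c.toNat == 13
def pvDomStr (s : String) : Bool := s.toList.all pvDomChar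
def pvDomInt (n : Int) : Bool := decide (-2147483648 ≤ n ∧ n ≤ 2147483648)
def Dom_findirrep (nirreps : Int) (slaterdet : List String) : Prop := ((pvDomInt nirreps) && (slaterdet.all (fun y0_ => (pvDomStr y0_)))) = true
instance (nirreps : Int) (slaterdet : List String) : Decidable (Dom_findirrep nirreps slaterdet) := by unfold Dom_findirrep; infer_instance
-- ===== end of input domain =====

-- B replaces A's three product tables, sirr list and table-chaining loop by one XOR fold over the
-- odd-occupation irrep indices (every table satisfies dpt[i][j] = (i XOR j) + 1); simpler, not claimed faster.


-- ===== PORT A =====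
def pvDpta : List (List Int) := [[1, 2], [2, 1]]
def pvDptb : List (List Int) := [[1, 2, 3, 4], [2, 1, 4, 3], [3, 4, 1, 2], [4, 3, 2, 1]]
def pvDptc : List (List Int) :=
  [[1, 2, 3, 4, 5, 6, 7, 8], [2, 1, 4, 3, 6, 5, 8, 7], [3, 4, 1, 2, 7, 8, 5, 6],
   [4, 3, 2, 1, 8, 7, 6, 5], [5, 6, 7, 8, 1, 2, 3, 4], [6, 5, 8, 7, 2, 1, 4, 3],
   [7, 8, 5, 6, 3, 4, 1, 2], [8, 7, 6, 5, 4, 3, 2, 1]]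

-- occstr = slaterdet[irr].replace('0','').replace('a','1').replace('b','1'); val = the digit-sum loop
def pvOccVal (s : String) : Int :=
  (PySem.Str.replace (PySem.Str.replace (PySem.Str.replace s "0" "") "a" "1") "b" "1").toList.foldl
    (fun val digit => val + (PySem.Int.ofChars? [digit]).getD 0) 0

-- dpt[i][j]
def pvLook (dpt : List (List Int)) (i j : Int) : Int :=
  PySem.List.pyGetD (PySem.List.pyGetD dpt i []) j 0

def findirrep (nirreps : Int) (slaterdet : List String) : Int :=
  let dpt : List (List Int) :=
    if nirreps = 2 then pvDpta else if nirreps = 4 then pvDptb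
    else if nirreps = 8 then pvDptc else []   -- Python leaves dpt unbound here; Pre_ excludes every input that reads it
  let sirr : List Int :=
    (PySem.List.pyRange 0 nirreps 1).foldl
      (fun sirr irr =>
        if irr > 0 ∧ PySem.Int.mod (pvOccVal (PySem.List.pyGetD slaterdet irr "")) 2 ≠ 0
        then sirr ++ [irr] else sirr) []
  let nsirr : Int := (sirr.length : Int)
  if nsirr = 0 then 1
  else if nsirr = 1 then PySem.List.pyGetD sirr 0 0 + 1
  else
    let irrep := pvLook dpt (PySem.List.pyGetD sirr 0 0) (PySem.List.pyGetD sirr 1 0)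
    if nsirr > 2 then
      (PySem.List.pyRange 2 nsirr 1).foldl
        (fun irrep irr => pvLook dpt (irrep - 1) (PySem.List.pyGetD sirr irr 0)) irrep
    else irrep

-- ===== PORT B =====
-- sum(c in 'ab13579' for c in s)
def pvOddCnt (s : String) : Int :=
  s.toList.foldl (fun t c => t + (if c ∈ (['a','b','1','3','5','7','9'] : List Char) then (1:Int) else 0)) 0

def findirrep_alt (nirreps : Int) (slaterdet : List String) : Int :=
  (PySem.List.pyRange 1 nirreps 1).foldl
    (fun acc irr =>
      if PySem.Int.mod (pvOddCnt (PySem.List.pyGetD slaterdet irr "")) 2 ≠ 0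
      then PySem.Int.bxor acc irr else acc) 0 + 1

-- ===== PRECONDITION & SPEC =====
-- the indices (among 1..nirreps-1) of the irreps with an odd occupation count
def pvOddIrrs (nirreps : Int) (slaterdet : List String) : List Int :=
  (PySem.List.pyRange 1 nirreps 1).filter
    (fun irr => ((PySem.List.pyGetD slaterdet irr "").toList.countP
        (fun c => c ∈ (['a','b','1','3','5','7','9'] : List Char))) % 2 = 1)

-- Pre_ excludes exactly the inputs on which the Python A raises: IndexError (fewer strings than
-- nirreps), ValueError (a character other than 0-9/a/b in an inspected string), and NameError
-- (nirreps not 2/4/8 while two or more irreps have odd occupation, so the unbound dpt is read).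
def Pre_findirrep (nirreps : Int) (slaterdet : List String) : Prop :=
  nirreps ≤ (slaterdet.length : Int) ∧
  (∀ s ∈ slaterdet.take nirreps.toNat, ∀ c ∈ s.toList,
      c ∈ (['0','1','2','3','4','5','6','7','8','9','a','b'] : List Char)) ∧
  (nirreps = 2 ∨ nirreps = 4 ∨ nirreps = 8 ∨ (pvOddIrrs nirreps slaterdet).length ≤ 1)
instance (nirreps : Int) (slaterdet : List String) : Decidable (Pre_findirrep nirreps slaterdet) := by
  unfold Pre_findirrep; infer_instance

def pvWitness_findirrep : Int × List String := (0, [])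

def Spec_findirrep (nirreps : Int) (slaterdet : List String) (out : Int) : Prop := out = findirrep_alt nirreps slaterdet
instance (nirreps : Int) (slaterdet : List String) (out : Int) : Decidable (Spec_findirrep nirreps slaterdet out) := by unfold Spec_findirrep; infer_instance

-- ===== CLAIM (what is proved, stated in full; the proofs are below) =====
def Claim_equal_findirrep : Prop := ∀ (nirreps : Int) (slaterdet : List String), Dom_findirrep nirreps slaterdet → Pre_findirrep nirreps slaterdet → Spec_findirrep nirreps slaterdet (findirrep nirreps slaterdet)

-- ===== LEMMAS AND PROOFS =====

theorem pv_go_single (x0 : Char) (new : List Char) :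
    ∀ (l : List Char) (fuel : Nat) (acc : List Char), l.length ≤ fuel →
      PySem.Chars.replace.go [x0] new fuel l acc
        = acc.reverse ++ l.flatMap (fun c => if c = x0 then new else [c]) := by
  intro l
  induction l with
  | nil =>
      intro fuel acc _
      cases fuel <;> simp [PySem.Chars.replace.go]
  | cons c t ih =>
      intro fuel acc h
      cases fuel with
      | zero => simp at h
      | succ fuel =>
        simp only [PySem.Chars.replace.go, List.isPrefixOf]
        by_cases hc : x0 = c
        · rw [if_pos (by simp [hc])]
          simp only [List.length_cons, List.length_nil, Nat.zero_add, List.drop_succ_cons,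
            List.drop_zero]
          rw [ih fuel _ (by simpa using h)]
          simp [← hc]
        · rw [if_neg (by simp [hc]), ih fuel _ (by simpa using h)]
          simp [Ne.symm hc]

theorem pv_replace_single (s : List Char) (x0 : Char) (new : List Char) :
    PySem.Chars.replace s [x0] new = s.flatMap (fun c => if c = x0 then new else [c]) := by
  unfold PySem.Chars.replace
  simp [pv_go_single x0 new s s.length [] le_rfl]

def pvG (c : Char) : List Char :=
  if c = '0' then [] else if c = 'a' then ['1'] else if c = 'b' then ['1'] else [c]

theorem pv_occ_eq (s : String) :
    (PySem.Str.replace (PySem.Str.replace (PySem.Str.replace s "0" "") "a" "1") "b" "1").toList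
      = s.toList.flatMap pvG := by
  simp only [PySem.Str.toList_replace]
  show PySem.Chars.replace (PySem.Chars.replace (PySem.Chars.replace s.toList ['0'] [])
      ['a'] ['1']) ['b'] ['1'] = _
  rw [pv_replace_single, pv_replace_single, pv_replace_single, List.flatMap_assoc, List.flatMap_assoc]
  apply List.flatMap_congr
  intro c _
  unfold pvG
  split_ifs <;> simp_all

def pvChVal (c : Char) : Int := (PySem.Int.ofChars? [c]).getD 0

theorem pv_char_key : ∀ m : Nat, m ≤ 126 →
    ((pvG (Char.ofNat m)).map pvChVal).sum % 2
      = (if Char.ofNat m ∈ (['a','b','1','3','5','7','9'] : List Char) then (1:Int) else 0) % 2 := by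
  decide

theorem pv_char_key' (c : Char) (h : pvDomChar c = true) :
    ((pvG c).map pvChVal).sum % 2
      = (if c ∈ (['a','b','1','3','5','7','9'] : List Char) then (1:Int) else 0) % 2 := by
  have hle : c.toNat ≤ 126 := by simp [pvDomChar] at h; omega
  have := pv_char_key c.toNat hle
  rwa [Char.ofNat_toNat] at this

theorem pv_sum_flatMap (f : Char → List Int) :
    ∀ l : List Char, (l.flatMap f).sum = (l.map (fun x => (f x).sum)).sum := by
  intro l
  induction l with
  | nil => simp
  | cons c t ih => simp [ih]

theorem pv_sum_parity_congr (F G : Char → Int) :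
    ∀ cs : List Char, (∀ c ∈ cs, F c % 2 = G c % 2) →
      (cs.map F).sum % 2 = (cs.map G).sum % 2 := by
  intro cs
  induction cs with
  | nil => simp
  | cons c t ih =>
      intro h
      simp only [List.map_cons, List.sum_cons]
      rw [Int.add_emod, h c (by simp), ih (fun d hd => h d (by simp [hd])), ← Int.add_emod]

-- the two parity tests agree on Dom strings
theorem pv_parity_eq (s : String) (hs : pvDomStr s = true) :
    PySem.Int.mod (pvOccVal s) 2 = PySem.Int.mod (pvOddCnt s) 2 := by
  rw [PySem.Int.mod_eq_emod_of_pos (by norm_num), PySem.Int.mod_eq_emod_of_pos (by norm_num)]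
  unfold pvOccVal pvOddCnt
  rw [pv_occ_eq, PySem.List.foldl_add, PySem.List.foldl_add]
  simp only [Int.zero_add, List.map_flatMap]
  rw [pv_sum_flatMap]
  have hmap : (s.toList.map fun c => ((pvG c).map pvChVal).sum).sum % 2
      = (s.toList.map fun c => (if c ∈ (['a','b','1','3','5','7','9'] : List Char) then (1:Int) else 0)).sum % 2 := by
    apply pv_sum_parity_congr
    intro c hc
    exact pv_char_key' c (by simp [pvDomStr, List.all_eq_true] at hs; exact hs c hc)
  simpa using hmap

-- Dom gives every accessed string's chars
theorem pv_dom_get (slaterdet : List String) (hdom : slaterdet.all (fun s => pvDomStr s) = true)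
    (irr : Int) : pvDomStr (PySem.List.pyGetD slaterdet irr "") = true := by
  simp only [List.all_eq_true] at hdom
  unfold PySem.List.pyGetD
  rcases h : PySem.List.pyGet? slaterdet irr with _ | v
  · rfl
  · exact hdom v (PySem.List.mem_of_pyGet?_eq_some slaterdet h)

def pvPredB (slaterdet : List String) (irr : Int) : Bool :=
  decide (PySem.Int.mod (pvOddCnt (PySem.List.pyGetD slaterdet irr "")) 2 ≠ 0)

-- A's sirr list is the filtered range
theorem pv_sirr_eq (nirreps : Int) (slaterdet : List String)
    (hdom : slaterdet.all (fun s => pvDomStr s) = true) :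
    (PySem.List.pyRange 0 nirreps 1).foldl
      (fun sirr irr =>
        if irr > 0 ∧ PySem.Int.mod (pvOccVal (PySem.List.pyGetD slaterdet irr "")) 2 ≠ 0
        then sirr ++ [irr] else sirr) []
    = (PySem.List.pyRange 1 nirreps 1).filter (pvPredB slaterdet) := by
  rw [PySem.List.foldl_append_ite_eq_filter
    (p := fun irr => irr > 0 ∧ PySem.Int.mod (pvOccVal (PySem.List.pyGetD slaterdet irr "")) 2 ≠ 0)]
  by_cases h : nirreps ≤ 0
  · rw [PySem.List.pyRange_one_eq_nil h, PySem.List.pyRange_one_eq_nil (by omega)]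
    simp
  · rw [PySem.List.pyRange_one_cons (by omega)]
    simp only [List.nil_append, List.filter_cons]
    rw [if_neg (by simp)]
    apply List.filter_congr
    intro irr hirr
    have h1 : 1 ≤ irr := ((PySem.List.mem_pyRange_one).1 hirr).1
    have hpar : PySem.Int.mod (pvOccVal (PySem.List.pyGetD slaterdet irr "")) 2
        = PySem.Int.mod (pvOddCnt (PySem.List.pyGetD slaterdet irr "")) 2 :=
      pv_parity_eq _ (pv_dom_get slaterdet hdom irr)
    unfold pvPredB
    rw [hpar]
    simp only [gt_iff_lt, decide_eq_decide]
    constructor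
    · exact fun hp => hp.2
    · intro hp; exact ⟨by omega, hp⟩

-- pvOddIrrs coincides with the filtered list both programs use
theorem pv_oddIrrs_eq (nirreps : Int) (slaterdet : List String) :
    pvOddIrrs nirreps slaterdet
      = (PySem.List.pyRange 1 nirreps 1).filter (pvPredB slaterdet) := by
  unfold pvOddIrrs
  apply List.filter_congr
  intro irr _
  unfold pvPredB pvOddCnt
  rw [PySem.List.foldl_add]
  rw [show (fun c => if c ∈ (['a','b','1','3','5','7','9'] : List Char) then (1:Int) else 0)
      = (fun c => if (decide (c ∈ (['a','b','1','3','5','7','9'] : List Char))) = true then (1:Int) else 0) from by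
    funext c; simp]
  rw [PySem.List.sum_map_ite_one_zero]
  rw [PySem.Int.mod_eq_emod_of_pos (by norm_num)]
  simp only [Int.zero_add, decide_eq_decide]
  omega

-- B computes the XOR fold of the filtered list
theorem pv_alt_eq (nirreps : Int) (slaterdet : List String) :
    findirrep_alt nirreps slaterdet
      = ((PySem.List.pyRange 1 nirreps 1).filter (pvPredB slaterdet)).foldl PySem.Int.bxor 0 + 1 := by
  unfold findirrep_alt
  rw [List.foldl_filter]
  congr 1
  apply PySem.List.foldl_congr_mem
  intro acc irr _
  unfold pvPredB
  simp

-- the selected product table is the XOR table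
theorem pv_look_xor (n i j : Int) (hn : n = 2 ∨ n = 4 ∨ n = 8)
    (hi : 0 ≤ i) (hi' : i < n) (hj : 0 ≤ j) (hj' : j < n) :
    pvLook (if n = 2 then pvDpta else if n = 4 then pvDptb else if n = 8 then pvDptc else []) i j
      = PySem.Int.bxor i j + 1 := by
  rcases hn with h | h | h <;> subst h <;> norm_num <;>
    interval_cases i <;> interval_cases j <;> decide

theorem pv_bxor_bounds (n i j : Int) (hn : n = 2 ∨ n = 4 ∨ n = 8)
    (hi : 0 ≤ i) (hi' : i < n) (hj : 0 ≤ j) (hj' : j < n) :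
    0 ≤ PySem.Int.bxor i j ∧ PySem.Int.bxor i j < n := by
  rcases hn with h | h | h <;> subst h <;>
    interval_cases i <;> interval_cases j <;> decide

-- chaining table lookups = XOR fold
theorem pv_chain (n : Int) (hn : n = 2 ∨ n = 4 ∨ n = 8) :
    ∀ (l : List Int) (acc : Int), (∀ x ∈ l, 0 ≤ x ∧ x < n) → 1 ≤ acc → acc ≤ n →
      l.foldl (fun ir s =>
          pvLook (if n = 2 then pvDpta else if n = 4 then pvDptb else if n = 8 then pvDptc else [])
            (ir - 1) s) acc
        = l.foldl PySem.Int.bxor (acc - 1) + 1 := by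
  intro l
  induction l with
  | nil => intro acc _ _ _; simp only [List.foldl_nil]; omega
  | cons x t ih =>
      intro acc hb h1 h2
      have hx := hb x (by simp)
      have hlk := pv_look_xor n (acc - 1) x hn (by omega) (by omega) hx.1 hx.2
      have hxb := pv_bxor_bounds n (acc - 1) x hn (by omega) (by omega) hx.1 hx.2
      simp only [List.foldl_cons]
      rw [hlk, ih _ (fun y hy => hb y (by simp [hy])) (by omega) (by omega)]
      congr 2
      omega

-- ===== VERDICT (by name: the statement is the Claim_ definition above) =====
theorem findirrep_spec : Claim_equal_findirrep := by
  intro n sd hdom hpre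
  unfold Spec_findirrep
  obtain ⟨h1, h2, h3⟩ := hpre
  have hdoms : sd.all (fun s => pvDomStr s) = true := by
    simp only [Dom_findirrep, Bool.and_eq_true] at hdom
    exact hdom.2
  rw [pv_alt_eq]
  show findirrep n sd = ((PySem.List.pyRange 1 n 1).filter (pvPredB sd)).foldl PySem.Int.bxor 0 + 1
  unfold findirrep
  rw [pv_sirr_eq n sd hdoms]
  set D : List (List Int) := (if n = 2 then pvDpta else if n = 4 then pvDptb else if n = 8 then pvDptc else []) with hD
  set L : List Int := (PySem.List.pyRange 1 n 1).filter (pvPredB sd) with hL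
  have hmem : ∀ x ∈ L, 1 ≤ x ∧ x < n := by
    intro x hx
    have hx' := List.mem_of_mem_filter hx
    have := (PySem.List.mem_pyRange_one).1 hx'
    omega
  clear_value L
  match L, hmem with
  | [], _ => norm_num
  | [x], hmem =>
      have : ¬ ((([x].length : Int)) = 0) := by norm_num
      norm_num [PySem.List.pyGetD_ofNat']
      rw [PySem.Int.bxor_comm, PySem.Int.bxor_zero]
  | x :: y :: rest, hmem =>
      have hxb := hmem x (by simp)
      have hyb := hmem y (by simp)
      have hlen0 : ¬ (((x :: y :: rest).length : Int) = 0) := by simp only [List.length_cons]; push_cast; omega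
      have hlen1 : ¬ (((x :: y :: rest).length : Int) = 1) := by simp only [List.length_cons]; push_cast; omega
      rw [if_neg hlen0, if_neg hlen1]
      have hn : n = 2 ∨ n = 4 ∨ n = 8 := by
        rcases h3 with h | h | h | h
        · exact Or.inl h
        · exact Or.inr (Or.inl h)
        · exact Or.inr (Or.inr h)
        · rw [pv_oddIrrs_eq, ← hL] at h
          simp at h
      have hlook := pv_look_xor n x y hn (by omega) (by omega) (by omega) (by omega)
      have hxy := pv_bxor_bounds n x y hn (by omega) (by omega) (by omega) (by omega)
      rw [PySem.List.pyGetD_ofNat' (x :: y :: rest) 0 0, PySem.List.pyGetD_ofNat' (x :: y :: rest) 1 0]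
      simp only [List.getD, List.getElem?_cons_zero, List.getElem?_cons_succ, Option.getD_some]
      by_cases hgt : (((x :: y :: rest).length : Int)) > 2
      · rw [if_pos hgt]
        rw [PySem.List.foldl_pyRange_pyGetD' (x :: y :: rest) 0
            (fun ir s => pvLook D (ir - 1) s) _ (by norm_num)]
        show (List.drop 2 (x :: y :: rest)).foldl _ (pvLook D x y) = _
        simp only [List.drop_succ_cons, List.drop_zero]
        rw [hD, pv_chain n hn rest (pvLook (if n = 2 then pvDpta else if n = 4 then pvDptb else if n = 8 then pvDptc else []) x y)
            (fun z hz => by have := hmem z (by simp [hz]); omega)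
            (by rw [hlook]; omega) (by rw [hlook]; omega)]
        rw [hlook]
        simp only [List.foldl_cons]
        rw [PySem.Int.bxor_comm 0 x, PySem.Int.bxor_zero]
        congr 2
        omega
      · have hrest : rest = [] := by
          simp only [List.length_cons] at hgt
          push_cast at hgt
          have : rest.length = 0 := by omega
          simpa using this
        subst hrest
        rw [if_neg hgt]
        rw [hlook]
        simp only [List.foldl_cons, List.foldl_nil]
        rw [PySem.Int.bxor_comm 0 x, PySem.Int.bxor_zero]
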